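-- pv_equiv track=rewrite | github.com/Moutardos/Advent2024 | day02/day02.py | is_dampener_safe
-- ===== SOURCE A (Python) =====
-- def extract_steps(line_tab):
--     tab_step = [int(line_tab[i]) - int(line_tab[i + 1]) for i in range(len(line_tab) - 1)]
--     return (tab_step)
--
-- def is_sorted(tab_step):
--     return (
--         all(
--             step < 0 for step in tab_step
--         ) or all(
--             step > 0 for step in tab_step
--         )
--     )
--
-- def check_step(tab_step, min = 1, max = 3):
--     return (
--         all(
--             abs(step) >= min and abs(step) <= max for step in tab_step
--         )
--     )
--
-- def is_safe(line_tab):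
--     tab_step = extract_steps(line_tab)
--     return (is_sorted(tab_step) and check_step(tab_step))
--
-- def is_dampener_safe(line_tab):
--     warning = 0
--     while not is_safe(line_tab):
--         warning += 1
--         if warning > 1:
--             return False
--         original_tab = line_tab.copy()
--         for i in range(len(original_tab)):
--             line_tab = original_tab.copy()
--             line_tab.pop(i)
--             if is_safe(line_tab):
--                 return True
--         return False
--     return True
-- ===== SOURCE B (Python) =====
-- # O(n): scan to the first bad adjacent pair, then only test removing one of the
-- # three nearby indices (i-1, i, i+1); any removal elsewhere leaves a bad pattern intact.
-- def is_dampener_safe(line_tab):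
--     n = len(line_tab)
--     if n < 2:
--         return True
--     sgn = line_tab[0] - line_tab[1] > 0
--
--     def ok(a, b):
--         d = a - b
--         return 1 <= abs(d) <= 3 and (d > 0) == sgn
--
--     i = 0
--     while i < n - 1 and ok(line_tab[i], line_tab[i + 1]):
--         i += 1
--     if i == n - 1:
--         return True
--
--     def safe(t):
--         if len(t) < 2:
--             return True
--         s = t[0] - t[1] > 0
--         return all(
--             1 <= abs(t[k] - t[k + 1]) <= 3 and (t[k] - t[k + 1] > 0) == s
--             for k in range(len(t) - 1)
--         )
--
--     return any(
--         safe(line_tab[:j] + line_tab[j + 1:])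
--         for j in (i - 1, i, i + 1)
--         if j >= 0
--     )
-- ===== Notes on version B (the rewrite author's own statement) =====
-- stated objective: faster
-- what changed: Instead of rechecking the whole list after removing every index in turn (O(n^2)), B scans once to the first adjacent pair that breaks the monotone step-bounded rule and tests only the three local removal candidates i-1, i, i+1, each in O(n).
import Mathlib
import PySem

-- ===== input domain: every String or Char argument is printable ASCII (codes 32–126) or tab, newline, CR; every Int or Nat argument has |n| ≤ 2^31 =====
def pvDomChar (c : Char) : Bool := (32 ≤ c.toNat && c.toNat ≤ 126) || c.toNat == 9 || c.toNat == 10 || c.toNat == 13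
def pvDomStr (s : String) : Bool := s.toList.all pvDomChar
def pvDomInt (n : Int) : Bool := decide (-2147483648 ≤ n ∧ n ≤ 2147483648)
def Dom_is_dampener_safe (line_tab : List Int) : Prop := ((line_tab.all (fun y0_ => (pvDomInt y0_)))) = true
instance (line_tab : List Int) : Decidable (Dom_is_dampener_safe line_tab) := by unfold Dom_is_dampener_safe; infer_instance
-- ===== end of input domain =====

-- B replaces A's try-every-removal O(n^2) loop by a single scan to the first bad
-- adjacent pair followed by at most three removal tests (alternative algorithm).

-- ===== PORT A =====
-- int(x) on an int is the identity, so the int() calls are dropped in the port.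
def extract_steps (line_tab : List Int) : List Int :=
  (PySem.List.pyRange 0 ((line_tab.length : Int) - 1) 1).map
    (fun i => PySem.List.pyGetD line_tab i 0 - PySem.List.pyGetD line_tab (i + 1) 0)

def is_sorted (tab_step : List Int) : Bool :=
  tab_step.all (fun step => decide (step < 0)) || tab_step.all (fun step => decide (0 < step))

def check_step (tab_step : List Int) (min max : Int) : Bool :=
  tab_step.all (fun step => decide (min ≤ |step|) && decide (|step| ≤ max))

def is_safe (line_tab : List Int) : Bool :=
  let tab_step := extract_steps line_tab
  is_sorted tab_step && check_step tab_step 1 3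

-- The while body always returns (True inside the for, else False), so it runs at
-- most once and `warning > 1` never fires; `pop(i)` on a fresh copy with
-- 0 ≤ i < len is exactly `eraseIdx i` (exact).
def is_dampener_safe (line_tab : List Int) : Bool :=
  if is_safe line_tab then true
  else
    (PySem.List.pyRange 0 (line_tab.length : Int) 1).any
      (fun i => is_safe (line_tab.eraseIdx i.toNat))

-- ===== PORT B =====
-- the closure `ok(a, b)` of Source B, applied to line_tab[i], line_tab[i+1]
def pvOk (line_tab : List Int) (sgn : Bool) (i : Nat) : Bool :=
  let d := PySem.List.pyGetD line_tab (i : Int) 0 - PySem.List.pyGetD line_tab ((i : Int) + 1) 0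
  decide (1 ≤ |d|) && decide (|d| ≤ 3) && (decide (0 < d) == sgn)

-- the `while i < n - 1 and ok(...)` scan of Source B
def pvScan (line_tab : List Int) (sgn : Bool) (i : Nat) : Nat :=
  if i < line_tab.length - 1 ∧ pvOk line_tab sgn i = true then pvScan line_tab sgn (i + 1)
  else i
termination_by line_tab.length - i
decreasing_by omega

-- the `safe(t)` helper of Source B
def pvSafe (t : List Int) : Bool :=
  if t.length < 2 then true
  else
    let s := decide (0 < PySem.List.pyGetD t 0 0 - PySem.List.pyGetD t 1 0)
    (PySem.List.pyRange 0 ((t.length : Int) - 1) 1).all (fun k =>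
      let d := PySem.List.pyGetD t k 0 - PySem.List.pyGetD t (k + 1) 0
      decide (1 ≤ |d|) && decide (|d| ≤ 3) && (decide (0 < d) == s))

def is_dampener_safe_alt (line_tab : List Int) : Bool :=
  let n := line_tab.length
  if n < 2 then true
  else
    let sgn := decide (0 < PySem.List.pyGetD line_tab 0 0 - PySem.List.pyGetD line_tab 1 0)
    let i := pvScan line_tab sgn 0
    if i = n - 1 then true
    else
      (([(i : Int) - 1, (i : Int), (i : Int) + 1].filter (fun j => decide (0 ≤ j))).any
        (fun j => pvSafe (PySem.List.slice line_tab none (some j) ++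
                          PySem.List.slice line_tab (some (j + 1)) none)))

-- ===== PRECONDITION & SPEC =====
def Spec_is_dampener_safe (line_tab : List Int) (out : Bool) : Prop := out = is_dampener_safe_alt line_tab
instance (line_tab : List Int) (out : Bool) : Decidable (Spec_is_dampener_safe line_tab out) := by unfold Spec_is_dampener_safe; infer_instance

-- ===== CLAIM (what is proved, stated in full; the proofs are below) =====
def Claim_equal_is_dampener_safe : Prop := ∀ (line_tab : List Int), Dom_is_dampener_safe line_tab → Spec_is_dampener_safe line_tab (is_dampener_safe line_tab)

-- ===== LEMMAS AND PROOFS =====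

def pvD (xs : List Int) (k : Nat) : Int := xs.getD k 0 - xs.getD (k + 1) 0

lemma pyRange_len_sub_one (n : Nat) :
    PySem.List.pyRange 0 ((n : Int) - 1) 1 = (List.range (n - 1)).map Int.ofNat := by
  rw [PySem.List.pyRange_one]
  have h : (((n:Int) - 1) - 0).toNat = n - 1 := by omega
  rw [h]
  refine List.map_congr_left (fun a _ => ?_)
  simp [Int.ofNat_eq_natCast]

lemma extract_eq (xs : List Int) :
    extract_steps xs = (List.range (xs.length - 1)).map (fun k => pvD xs k) := by
  unfold extract_steps
  rw [pyRange_len_sub_one, List.map_map]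
  refine List.map_congr_left (fun k hk => ?_)
  simp only [Function.comp]
  have h1 := PySem.List.pyGetD_natCast xs k (0:Int)
  have h2 := PySem.List.pyGetD_natCast xs (k+1) (0:Int)
  push_cast at h2
  rw [Int.ofNat_eq_natCast, h1, h2, pvD]





def pvOkP (xs : List Int) (b : Bool) (k : Nat) : Prop :=
  (1 ≤ |pvD xs k| ∧ |pvD xs k| ≤ 3) ∧ ((0 < pvD xs k) ↔ b = true)

lemma pvOk_iff (xs : List Int) (b : Bool) (k : Nat) :
    pvOk xs b k = true ↔ pvOkP xs b k := by
  have h1 := PySem.List.pyGetD_natCast xs k (0:Int)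
  have h2 := PySem.List.pyGetD_natCast xs (k+1) (0:Int)
  push_cast at h2
  unfold pvOk pvOkP
  rw [h1, h2]
  simp only [Bool.and_eq_true, decide_eq_true_iff, beq_iff_eq, pvD]
  constructor
  · rintro ⟨⟨ha, hb⟩, hc⟩
    refine ⟨⟨ha, hb⟩, ?_⟩
    rw [← hc]; simp
  · rintro ⟨⟨ha, hb⟩, hc⟩
    refine ⟨⟨ha, hb⟩, ?_⟩
    cases b <;> simp_all

lemma is_safe_iff (xs : List Int) :
    is_safe xs = true ↔
      ((∀ k < xs.length - 1, pvD xs k < 0) ∨ (∀ k < xs.length - 1, 0 < pvD xs k)) ∧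
        (∀ k < xs.length - 1, 1 ≤ |pvD xs k| ∧ |pvD xs k| ≤ 3) := by
  unfold is_safe is_sorted check_step
  rw [extract_eq]
  simp [List.all_eq_true, List.mem_range]

lemma is_safe_small (xs : List Int) (h : xs.length < 2) : is_safe xs = true := by
  rw [is_safe_iff]
  constructor
  · left; intro k hk; omega
  · intro k hk; omega

lemma abs_ge_one (a : Int) : 1 ≤ |a| ↔ a ≤ -1 ∨ 1 ≤ a := by rw [abs]; simp; omega

lemma is_safe_iff_ok (xs : List Int) (h2 : 2 ≤ xs.length) :
    is_safe xs = true ↔ ∀ k < xs.length - 1, pvOkP xs (decide (0 < pvD xs 0)) k := by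
  rw [is_safe_iff]
  have h0 : 0 < xs.length - 1 := by omega
  constructor
  · rintro ⟨hs | hs, hb⟩ <;> intro k hk <;>
      exact ⟨hb k hk, by simp [decide_eq_true_iff]; constructor <;> intro h <;>
        [skip; skip] <;> first
          | (exfalso; have := hs k hk; have := hs 0 h0; omega)
          | (first | exact hs 0 h0 | exact hs k hk)⟩
  · intro h
    refine ⟨?_, fun k hk => (h k hk).1⟩
    by_cases hp : 0 < pvD xs 0
    · right; intro k hk
      exact (h k hk).2.mpr (by simp [hp])
    · left; intro k hk
      have hb := (h k hk).1.1
      have hs := (h k hk).2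
      rw [abs_ge_one] at hb
      have : ¬ (0 < pvD xs k) := fun hx => hp (by have := hs.mp hx; simp at this; exact this)
      omega


lemma pyGetD_zero_one (xs : List Int) :
    PySem.List.pyGetD xs 0 0 - PySem.List.pyGetD xs 1 0 = pvD xs 0 := by
  have h0 := PySem.List.pyGetD_natCast xs 0 (0:Int)
  have h1 := PySem.List.pyGetD_natCast xs 1 (0:Int)
  push_cast at h0 h1
  rw [h0, h1, pvD]

lemma pvSafe_eq (xs : List Int) : pvSafe xs = is_safe xs := by
  unfold pvSafe
  by_cases h : xs.length < 2
  · simp [h, is_safe_small xs h]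
  · simp only [h, if_false]
    push_neg at h
    apply Bool.coe_iff_coe.mp
    rw [is_safe_iff_ok xs h, pyRange_len_sub_one, List.all_map, List.all_eq_true]
    constructor
    · intro hall k hk
      have h1 := hall k (List.mem_range.mpr hk)
      rw [pyGetD_zero_one] at h1
      rw [← pvOk_iff]
      unfold pvOk
      push_cast at h1 ⊢
      exact h1
    · intro hall k hk
      have hk' := List.mem_range.mp hk
      have h1 := (pvOk_iff xs _ k).mpr (hall k hk')
      unfold pvOk at h1
      rw [pyGetD_zero_one]
      push_cast at h1 ⊢
      exact h1


lemma pvScan_spec (xs : List Int) (b : Bool) :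
    ∀ i, i ≤ xs.length - 1 → (∀ k < i, pvOk xs b k = true) →
      (∀ k < pvScan xs b i, pvOk xs b k = true) ∧ i ≤ pvScan xs b i ∧
        pvScan xs b i ≤ xs.length - 1 ∧
        (pvScan xs b i = xs.length - 1 ∨ pvOk xs b (pvScan xs b i) = false) := by
  have H : ∀ m i, xs.length - 1 - i ≤ m → i ≤ xs.length - 1 → (∀ k < i, pvOk xs b k = true) →
      (∀ k < pvScan xs b i, pvOk xs b k = true) ∧ i ≤ pvScan xs b i ∧
        pvScan xs b i ≤ xs.length - 1 ∧
        (pvScan xs b i = xs.length - 1 ∨ pvOk xs b (pvScan xs b i) = false) := by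
    intro m
    induction m with
    | zero =>
      intro i hm hle hok
      have hi : i = xs.length - 1 := by omega
      rw [pvScan]
      have hc : ¬ (i < xs.length - 1 ∧ pvOk xs b i = true) := by
        rintro ⟨h1, _⟩; omega
      rw [if_neg hc]
      exact ⟨hok, le_refl i, hle, Or.inl hi⟩
    | succ m ih =>
      intro i hm hle hok
      rw [pvScan]
      by_cases hc : i < xs.length - 1 ∧ pvOk xs b i = true
      · rw [if_pos hc]
        have hok' : ∀ k < i + 1, pvOk xs b k = true := by
          intro k hk
          rcases Nat.lt_succ_iff_lt_or_eq.mp hk with h | h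
          · exact hok k h
          · subst h; exact hc.2
        have := ih (i + 1) (by omega) (by omega) hok'
        exact ⟨this.1, by omega, this.2.2⟩
      · rw [if_neg hc]
        refine ⟨hok, le_refl i, hle, ?_⟩
        by_cases h1 : i = xs.length - 1
        · exact Or.inl h1
        · right
          have : ¬ pvOk xs b i = true := fun h => hc ⟨by omega, h⟩
          exact Bool.not_eq_true _ |>.mp this
  intro i
  exact H (xs.length - 1 - i) i (le_refl _)

lemma pvD_erase_lt (xs : List Int) (k j : Nat) (h : j + 1 < k)
    (hj : j + 1 < (xs.eraseIdx k).length) : pvD (xs.eraseIdx k) j = pvD xs j := by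
  have hlen : (xs.eraseIdx k).length ≤ xs.length := by
    rw [List.length_eraseIdx]; split <;> omega
  unfold pvD
  rw [List.getD_eq_getElem _ 0 hj, List.getD_eq_getElem _ 0 (by omega : j < (xs.eraseIdx k).length),
      List.getElem_eraseIdx_of_lt _ (by omega), List.getElem_eraseIdx_of_lt _ (by omega),
      ← List.getD_eq_getElem _ 0, ← List.getD_eq_getElem _ 0]

lemma pvD_erase_ge (xs : List Int) (k j : Nat) (h : k ≤ j)
    (hj : j + 1 < (xs.eraseIdx k).length) : pvD (xs.eraseIdx k) j = pvD xs (j + 1) := by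
  unfold pvD
  rw [List.getD_eq_getElem _ 0 hj, List.getD_eq_getElem _ 0 (by omega : j < (xs.eraseIdx k).length),
      List.getElem_eraseIdx_of_ge _ (by omega), List.getElem_eraseIdx_of_ge _ (by omega),
      ← List.getD_eq_getElem _ 0, ← List.getD_eq_getElem _ 0]

lemma slice_erase (xs : List Int) (j : Int) (hj : 0 ≤ j) :
    PySem.List.slice xs none (some j) ++ PySem.List.slice xs (some (j + 1)) none =
      xs.eraseIdx j.toNat := by
  rw [PySem.List.slice_to xs hj, PySem.List.slice_from xs (by omega),
      List.eraseIdx_eq_take_drop_succ]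
  have h : (j + 1).toNat = j.toNat + 1 := by omega
  rw [h]

lemma erase_far_unsafe (xs : List Int) (i k : Nat)
    (hin : i + 1 < xs.length) (hk : k < xs.length)
    (hok : ∀ m < i, pvOkP xs (decide (0 < pvD xs 0)) m)
    (hbad : ¬ pvOkP xs (decide (0 < pvD xs 0)) i)
    (hfar : k + 2 ≤ i ∨ i + 2 ≤ k) :
    is_safe (xs.eraseIdx k) = false := by
  have hlen : (xs.eraseIdx k).length = xs.length - 1 := by
    rw [List.length_eraseIdx]; simp [hk]
  by_contra hcon
  have hsafe : is_safe (xs.eraseIdx k) = true := by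
    cases h : is_safe (xs.eraseIdx k)
    · exact absurd h hcon
    · rfl
  have h2 : 2 ≤ (xs.eraseIdx k).length := by omega
  have hall := (is_safe_iff_ok (xs.eraseIdx k) h2).mp hsafe
  apply hbad
  rcases hfar with hf | hf
  · -- k + 2 ≤ i : steps i-1 and i-2 of the erased list are steps i and i-1 of xs
    have hD1 : pvD (xs.eraseIdx k) (i - 1) = pvD xs i := by
      rw [pvD_erase_ge xs k (i - 1) (by omega) (by omega)]
      congr 1
      omega
    have hD2 : pvD (xs.eraseIdx k) (i - 2) = pvD xs (i - 1) := by
      rw [pvD_erase_ge xs k (i - 2) (by omega) (by omega)]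
      congr 1
      omega
    have ha1 := hall (i - 1) (by omega)
    have ha2 := hall (i - 2) (by omega)
    rw [pvOkP, hD1] at ha1
    rw [pvOkP, hD2] at ha2
    have hprev := hok (i - 1) (by omega)
    rw [pvOkP] at hprev
    refine ⟨ha1.1, ?_⟩
    rw [ha1.2, ← ha2.2, hprev.2]
  · -- i + 2 ≤ k : steps i and 0 of the erased list are steps i and 0 of xs
    have hD1 : pvD (xs.eraseIdx k) i = pvD xs i := pvD_erase_lt xs k i (by omega) (by omega)
    have hD0 : pvD (xs.eraseIdx k) 0 = pvD xs 0 := pvD_erase_lt xs k 0 (by omega) (by omega)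
    have ha1 := hall i (by omega)
    have ha0 := hall 0 (by omega)
    rw [pvOkP, hD1] at ha1
    rw [pvOkP, hD0] at ha0
    refine ⟨ha1.1, ?_⟩
    rw [ha1.2, ← ha0.2]
    simp [hD0]

theorem pv_main (xs : List Int) : is_dampener_safe xs = is_dampener_safe_alt xs := by
  unfold is_dampener_safe is_dampener_safe_alt
  simp only [pyGetD_zero_one]
  by_cases hn : xs.length < 2
  · rw [if_pos (is_safe_small xs hn)]
    simp [hn]
  · push_neg at hn
    simp only [Nat.not_lt.mpr hn, if_false]
    obtain ⟨hall, -, hle, hlast⟩ := pvScan_spec xs (decide (0 < pvD xs 0)) 0 (by omega)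
      (fun k hk => absurd hk (Nat.not_lt_zero k))
    set i := pvScan xs (decide (0 < pvD xs 0)) 0 with hi
    by_cases hend : i = xs.length - 1
    · -- no violation: both sides are true
      have hsafe : is_safe xs = true := by
        rw [is_safe_iff_ok xs hn]
        intro k hk
        exact (pvOk_iff _ _ _).mp (hall k (hend ▸ hk))
      simp [hsafe, hend]
    · -- violation at i
      have hilt : i < xs.length - 1 := by omega
      have hbadb : pvOk xs (decide (0 < pvD xs 0)) i = false := by
        rcases hlast with h | h
        · exact absurd h hend
        · exact h
      have hbad : ¬ pvOkP xs (decide (0 < pvD xs 0)) i := by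
        rw [← pvOk_iff, hbadb]; simp
      have hokP : ∀ m < i, pvOkP xs (decide (0 < pvD xs 0)) m :=
        fun m hm => (pvOk_iff _ _ _).mp (hall m hm)
      have hunsafe : is_safe xs = false := by
        cases h : is_safe xs
        · rfl
        · exact absurd ((is_safe_iff_ok xs hn).mp h i hilt) hbad
      rw [hunsafe]
      simp only [Bool.false_eq_true, if_false, hend]
      apply Bool.coe_iff_coe.mp
      rw [List.any_eq_true, List.any_eq_true]
      constructor
      · rintro ⟨a, hmem, hS⟩
        have har := (PySem.List.mem_pyRange_one).mp hmem
        have htn : a.toNat < xs.length := by omega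
        have hnear : ¬ (a.toNat + 2 ≤ i ∨ i + 2 ≤ a.toNat) := by
          rintro hfar
          rw [erase_far_unsafe xs i a.toNat (by omega) htn hokP hbad hfar] at hS
          exact absurd hS (by simp)
        push_neg at hnear
        have hcase : (1 ≤ i ∧ a.toNat = i - 1) ∨ a.toNat = i ∨ a.toNat = i + 1 := by omega
        rcases hcase with ⟨h1, h2⟩ | h2 | h2
        · refine ⟨(i : Int) - 1, by simp [List.mem_filter]; omega, ?_⟩
          rw [slice_erase xs _ (by omega), pvSafe_eq]
          have : ((i : Int) - 1).toNat = a.toNat := by omega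
          rw [this]; exact hS
        · refine ⟨(i : Int), by simp [List.mem_filter], ?_⟩
          rw [slice_erase xs _ (by omega), pvSafe_eq]
          have : ((i : Int)).toNat = a.toNat := by omega
          rw [this]; exact hS
        · refine ⟨(i : Int) + 1, by simp [List.mem_filter]; omega, ?_⟩
          rw [slice_erase xs _ (by omega), pvSafe_eq]
          have : ((i : Int) + 1).toNat = a.toNat := by omega
          rw [this]; exact hS
      · rintro ⟨j, hmem, hS⟩
        simp only [List.mem_filter, List.mem_cons, List.not_mem_nil, or_false,
          decide_eq_true_iff] at hmem
        obtain ⟨hj3, hj0⟩ := hmem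
        refine ⟨j, PySem.List.mem_pyRange_one.mpr ⟨hj0, ?_⟩, ?_⟩
        · rcases hj3 with h | h | h <;> subst h <;> omega
        · rw [slice_erase xs j hj0, pvSafe_eq] at hS
          exact hS

-- ===== VERDICT (by name: the statement is the Claim_ definition above) =====
theorem is_dampener_safe_spec : Claim_equal_is_dampener_safe := by
  intro line_tab _
  unfold Spec_is_dampener_safe
  exact pv_main line_tab
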